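-- pv_equiv track=rewrite | github.com/UPHL-BioNGS/walkercreek | bin/nanoplot_report_stats_filt.py | parse_nanostats
-- ===== SOURCE A (Python) =====
-- def parse_nanostats(file_handle):
--     mean_length = None
--     mean_quality = None
--     num_reads = None
--     total_bases = None
--
--     for line in file_handle:
--         line = line.strip()
--         if line.startswith("Mean read length:"):
--             mean_length = line.split(":")[1].strip()
--         elif line.startswith("Mean read quality:"):
--             mean_quality = line.split(":")[1].strip()
--         elif line.startswith("Number of reads:"):
--             num_reads = line.split(":")[1].strip()
--         elif line.startswith("Total bases:"):
--             total_bases = line.split(":")[1].strip()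
--
--     return mean_length, mean_quality, num_reads, total_bases
-- ===== SOURCE B (Python) =====
-- def _last_value(lines, prefix):
--     # last occurrence wins, so scan back-to-front and stop at the first hit
--     for raw in reversed(lines):
--         line = raw.strip()
--         if line.startswith(prefix):
--             return line.split(":")[1].strip()
--     return None
--
-- def parse_nanostats(file_handle):
--     lines = list(file_handle)
--     return (_last_value(lines, "Mean read length:"),
--             _last_value(lines, "Mean read quality:"),
--             _last_value(lines, "Number of reads:"),
--             _last_value(lines, "Total bases:"))
-- ===== Notes on version B (the rewrite author's own statement) =====
-- stated objective: alternative
-- what changed: Instead of one forward pass mutating four slot variables, B does four independent back-to-front scans, each returning on the FIRST match found from the end (correct because the four prefixes are mutually exclusive, so A's last-match-wins per field equals first match in reverse).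
import Mathlib
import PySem

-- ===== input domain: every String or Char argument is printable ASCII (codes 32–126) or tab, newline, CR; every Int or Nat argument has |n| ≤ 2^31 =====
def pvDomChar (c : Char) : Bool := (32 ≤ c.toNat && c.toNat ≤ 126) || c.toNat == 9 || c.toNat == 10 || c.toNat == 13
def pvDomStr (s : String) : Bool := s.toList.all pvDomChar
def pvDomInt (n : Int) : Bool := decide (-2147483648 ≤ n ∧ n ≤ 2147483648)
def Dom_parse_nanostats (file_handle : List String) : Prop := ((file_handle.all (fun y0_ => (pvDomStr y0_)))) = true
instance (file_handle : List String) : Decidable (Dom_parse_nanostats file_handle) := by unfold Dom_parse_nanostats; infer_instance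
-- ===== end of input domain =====

-- B replaces A's single forward pass over four slot variables by four independent
-- back-to-front scans that each stop at the first match (objective: alternative).

-- ===== PORT A =====
-- line.split(":")[1].strip(); the index-1 access is guarded by startswith on a
-- prefix that contains ':' in every branch, so the [1] element always exists and
-- the getD defaults are never reached (Python never raises here).
def pvFieldValA (line : String) : String :=
  PySem.Str.strip ((PySem.List.pyGet? ((PySem.Str.split? line ":").getD []) 1).getD "")

-- one iteration of A's for-loop body (the if/elif chain updating the four slots)
def pvStepA (st : Option String × Option String × Option String × Option String)
    (raw : String) : Option String × Option String × Option String × Option String :=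
  let line := PySem.Str.strip raw
  if PySem.Str.startswith line "Mean read length:" then
    (some (pvFieldValA line), st.2.1, st.2.2.1, st.2.2.2)
  else if PySem.Str.startswith line "Mean read quality:" then
    (st.1, some (pvFieldValA line), st.2.2.1, st.2.2.2)
  else if PySem.Str.startswith line "Number of reads:" then
    (st.1, st.2.1, some (pvFieldValA line), st.2.2.2)
  else if PySem.Str.startswith line "Total bases:" then
    (st.1, st.2.1, st.2.2.1, some (pvFieldValA line))
  else st

def parse_nanostats (file_handle : List String) :
    Option String × Option String × Option String × Option String :=
  file_handle.foldl pvStepA (none, none, none, none)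

-- ===== PORT B =====
-- the 'for raw in reversed(lines): … return …; return None' loop of _last_value
def pvLastGo (pre : String) : List String → Option String
  | [] => none
  | raw :: rest =>
    let line := PySem.Str.strip raw
    if PySem.Str.startswith line pre then
      some (PySem.Str.strip ((PySem.List.pyGet? ((PySem.Str.split? line ":").getD []) 1).getD ""))
    else pvLastGo pre rest

def pvLastValue (lines : List String) (pre : String) : Option String :=
  pvLastGo pre lines.reverse

def parse_nanostats_alt (file_handle : List String) :
    Option String × Option String × Option String × Option String :=
  let lines := file_handle
  (pvLastValue lines "Mean read length:",
   pvLastValue lines "Mean read quality:",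
   pvLastValue lines "Number of reads:",
   pvLastValue lines "Total bases:")

-- ===== PRECONDITION & SPEC =====
def Spec_parse_nanostats (file_handle : List String) (out : Option String × Option String × Option String × Option String) : Prop := out = parse_nanostats_alt file_handle
instance (file_handle : List String) (out : Option String × Option String × Option String × Option String) : Decidable (Spec_parse_nanostats file_handle out) := by unfold Spec_parse_nanostats; infer_instance

-- ===== CLAIM (what is proved, stated in full; the proofs are below) =====
def Claim_equal_parse_nanostats : Prop := ∀ (file_handle : List String), Dom_parse_nanostats file_handle → Spec_parse_nanostats file_handle (parse_nanostats file_handle)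

-- ===== LEMMAS AND PROOFS =====

-- first-some choice, A's "later assignment overwrites" seen from the right
def pvOr : Option String → Option String → Option String
  | some v, _ => some v
  | none, d => d

theorem pvOr_none (o : Option String) : pvOr o none = o := by cases o <;> rfl

theorem pvOr_assoc (a b c : Option String) :
    pvOr (pvOr a b) c = pvOr a (pvOr b c) := by cases a <;> cases b <;> rfl

theorem pvLastGo_append (pre : String) (xs ys : List String) :
    pvLastGo pre (xs ++ ys) = pvOr (pvLastGo pre xs) (pvLastGo pre ys) := by
  induction xs with
  | nil => rfl
  | cons raw rest ih =>
    simp only [List.cons_append, pvLastGo, ih]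
    split <;> rfl

-- the four prefixes are pairwise incomparable, so no line starts with two of them
theorem pv_excl {p q : String} (hp : ¬ (p.toList <+: q.toList))
    (hq : ¬ (q.toList <+: p.toList)) (s : String)
    (h : PySem.Str.startswith s p = true) : PySem.Str.startswith s q = false := by
  by_contra hc
  have hq' : PySem.Str.startswith s q = true := by
    cases hqq : PySem.Str.startswith s q with
    | false => exact absurd hqq hc
    | true => rfl
  rw [PySem.Str.startswith_eq, PySem.Chars.startswith_iff] at h hq'
  rcases List.prefix_or_prefix_of_prefix h hq' with h' | h'
  · exact hp h'
  · exact hq h'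

theorem pvStepA_eq (st : Option String × Option String × Option String × Option String)
    (raw : String) :
    pvStepA st raw =
      (pvOr (pvLastGo "Mean read length:" [raw]) st.1,
       pvOr (pvLastGo "Mean read quality:" [raw]) st.2.1,
       pvOr (pvLastGo "Number of reads:" [raw]) st.2.2.1,
       pvOr (pvLastGo "Total bases:" [raw]) st.2.2.2) := by
  by_cases h1 : PySem.Str.startswith (PySem.Str.strip raw) "Mean read length:" = true
  · have e2 := pv_excl (p := "Mean read length:") (q := "Mean read quality:")
      (by decide) (by decide) _ h1
    have e3 := pv_excl (p := "Mean read length:") (q := "Number of reads:")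
      (by decide) (by decide) _ h1
    have e4 := pv_excl (p := "Mean read length:") (q := "Total bases:")
      (by decide) (by decide) _ h1
    simp only [pvStepA, pvLastGo, pvFieldValA, h1, e2, e3, e4, Bool.false_eq_true, if_true, if_false, pvOr]
  · rw [Bool.not_eq_true] at h1
    by_cases h2 : PySem.Str.startswith (PySem.Str.strip raw) "Mean read quality:" = true
    · have e3 := pv_excl (p := "Mean read quality:") (q := "Number of reads:")
        (by decide) (by decide) _ h2
      have e4 := pv_excl (p := "Mean read quality:") (q := "Total bases:")
        (by decide) (by decide) _ h2
      simp only [pvStepA, pvLastGo, pvFieldValA, h1, h2, e3, e4, Bool.false_eq_true, if_true, if_false, pvOr]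
    · rw [Bool.not_eq_true] at h2
      by_cases h3 : PySem.Str.startswith (PySem.Str.strip raw) "Number of reads:" = true
      · have e4 := pv_excl (p := "Number of reads:") (q := "Total bases:")
          (by decide) (by decide) _ h3
        simp only [pvStepA, pvLastGo, pvFieldValA, h1, h2, h3, e4, Bool.false_eq_true, if_true, if_false, pvOr]
      · rw [Bool.not_eq_true] at h3
        by_cases h4 : PySem.Str.startswith (PySem.Str.strip raw) "Total bases:" = true
        · simp only [pvStepA, pvLastGo, pvFieldValA, h1, h2, h3, h4, Bool.false_eq_true, if_true, if_false, pvOr]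
        · rw [Bool.not_eq_true] at h4
          simp only [pvStepA, pvLastGo, pvFieldValA, h1, h2, h3, h4, Bool.false_eq_true, if_false, pvOr]

theorem pv_fold_eq (fh : List String) :
    ∀ st, fh.foldl pvStepA st =
      (pvOr (pvLastGo "Mean read length:" fh.reverse) st.1,
       pvOr (pvLastGo "Mean read quality:" fh.reverse) st.2.1,
       pvOr (pvLastGo "Number of reads:" fh.reverse) st.2.2.1,
       pvOr (pvLastGo "Total bases:" fh.reverse) st.2.2.2) := by
  induction fh with
  | nil => intro st; simp [pvLastGo, pvOr]
  | cons raw rest ih =>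
    intro st
    rw [List.foldl_cons, ih]
    simp only [pvStepA_eq, List.reverse_cons, pvLastGo_append, pvOr_assoc]

-- ===== VERDICT (by name: the statement is the Claim_ definition above) =====
theorem parse_nanostats_spec : Claim_equal_parse_nanostats := by
  intro fh _
  unfold Spec_parse_nanostats parse_nanostats parse_nanostats_alt pvLastValue
  rw [pv_fold_eq fh (none, none, none, none)]
  simp [pvOr_none]
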